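-- pv_equiv track=rewrite | github.com/jbajic/advent-of-code | 2023/day12/main.py | get_spring_line_islands_records
-- ===== SOURCE A (Python) =====
-- def get_spring_line_islands_records(spring_line):
--     islands = []
--     island = []
--     for elem in spring_line:
--         if elem == "." and island:
--             islands.append(island)
--             island = []
--         elif elem != ".":
--             island.append(elem)
--
--     if island:
--         islands.append(island)
--
--     return list(map(len, islands))
-- ===== SOURCE B (Python) =====
-- def get_spring_line_islands_records(spring_line):
--     dots = [i for i, c in enumerate(spring_line) if c == "."]
--     bounds = [-1] + dots + [len(spring_line)]
--     return [b - a - 1 for a, b in zip(bounds, bounds[1:]) if b - a > 1]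
-- ===== Notes on version B (the rewrite author's own statement) =====
-- stated objective: alternative
-- what changed: Instead of A's run-accumulator state machine that builds element lists and maps len, B first collects the positions of the dots, frames them with -1 and len, and returns the positive gaps between consecutive boundary positions (b - a - 1).
import Mathlib
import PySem

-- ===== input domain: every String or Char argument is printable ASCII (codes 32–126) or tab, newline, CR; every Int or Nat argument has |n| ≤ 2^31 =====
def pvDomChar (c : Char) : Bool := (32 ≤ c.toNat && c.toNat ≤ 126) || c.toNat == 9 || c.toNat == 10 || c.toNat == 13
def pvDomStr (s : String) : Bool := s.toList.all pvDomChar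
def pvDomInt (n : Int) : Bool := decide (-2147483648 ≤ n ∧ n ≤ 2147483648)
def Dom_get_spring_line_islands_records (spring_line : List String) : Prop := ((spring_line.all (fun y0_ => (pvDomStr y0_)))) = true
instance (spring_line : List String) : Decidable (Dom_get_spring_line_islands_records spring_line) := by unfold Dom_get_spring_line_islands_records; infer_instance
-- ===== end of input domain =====

-- B replaces A's run-accumulator state machine by a boundary-gap computation: collect the
-- dot positions, frame them with -1 and len, and return the positive gaps between
-- consecutive boundaries (alternative decomposition, same cost).

-- ===== PORT A =====
-- literal port of A's loop: state = (islands, island), both lists of elements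
def get_spring_line_islands_records (spring_line : List String) : List Int :=
  let st := spring_line.foldl
    (fun (st : List (List String) × List String) elem =>
      if elem = "." ∧ st.2 ≠ [] then (st.1 ++ [st.2], [])
      else if elem ≠ "." then (st.1, st.2 ++ [elem])
      else st)
    ([], [])
  let islands := if st.2 ≠ [] then st.1 ++ [st.2] else st.1
  islands.map (fun i => (i.length : Int))

-- ===== PORT B =====
-- dots = [i for i, c in enumerate(spring_line) if c == "."]
-- bounds = [-1] + dots + [len(spring_line)]
-- [b - a - 1 for a, b in zip(bounds, bounds[1:]) if b - a > 1]
def get_spring_line_islands_records_alt (spring_line : List String) : List Int :=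
  let dots := (PySem.List.enumerate spring_line).filterMap
    (fun p => if p.2 = "." then some p.1 else none)
  let bounds := [(-1 : Int)] ++ dots ++ [(spring_line.length : Int)]
  (bounds.zip (bounds.drop 1)).filterMap
    (fun p => if p.2 - p.1 > 1 then some (p.2 - p.1 - 1) else none)

-- ===== PRECONDITION & SPEC =====
def Spec_get_spring_line_islands_records (spring_line : List String) (out : List Int) : Prop := out = get_spring_line_islands_records_alt spring_line
instance (spring_line : List String) (out : List Int) : Decidable (Spec_get_spring_line_islands_records spring_line out) := by unfold Spec_get_spring_line_islands_records; infer_instance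

-- ===== CLAIM (what is proved, stated in full; the proofs are below) =====
def Claim_equal_get_spring_line_islands_records : Prop := ∀ (spring_line : List String), Dom_get_spring_line_islands_records spring_line → Spec_get_spring_line_islands_records spring_line (get_spring_line_islands_records spring_line)

-- ===== LEMMAS AND PROOFS =====

-- reference spec: lengths of maximal non-dot runs, `n` = length of the currently open run
def gsS (n : Int) : List String → List Int
  | [] => if n = 0 then [] else [n]
  | x :: xs => if x = "." then (if n = 0 then gsS 0 xs else n :: gsS 0 xs) else gsS (n + 1) xs

def gsStep (st : List (List String) × List String) (elem : String) : List (List String) × List String :=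
  if elem = "." ∧ st.2 ≠ [] then (st.1 ++ [st.2], [])
  else if elem ≠ "." then (st.1, st.2 ++ [elem])
  else st

def gsFin (st : List (List String) × List String) : List Int :=
  (if st.2 ≠ [] then st.1 ++ [st.2] else st.1).map (fun i => (i.length : Int))

theorem gsA_char (xs : List String) : ∀ (islands : List (List String)) (island : List String),
    gsFin (xs.foldl gsStep (islands, island))
      = islands.map (fun i => (i.length : Int)) ++ gsS (island.length : Int) xs := by
  induction xs with
  | nil =>
      intro islands island
      cases island with
      | nil => simp [gsFin, gsS]
      | cons a l =>
          simp [gsFin, gsS]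
          omega
  | cons x xs ih =>
      intro islands island
      simp only [List.foldl_cons]
      by_cases hx : x = "."
      · cases island with
        | nil =>
            simp [gsStep, hx, ih, gsS]
        | cons a l =>
            have : gsStep (islands, a :: l) x = (islands ++ [a :: l], []) := by
              simp [gsStep, hx]
            rw [this, ih]
            simp [gsS, hx, List.map_append]
            omega
      · have : gsStep (islands, island) x = (islands, island ++ [x]) := by
          simp [gsStep, hx]
        rw [this, ih]
        simp [gsS, hx]

-- B-side: gap computation on the boundary list
def gsDiffs (l : List Int) : List Int :=
  (l.zip (l.drop 1)).filterMap (fun p => if p.2 - p.1 > 1 then some (p.2 - p.1 - 1) else none)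

def gsDots (s : Int) : List String → List Int
  | [] => []
  | x :: xs => if x = "." then s :: gsDots (s + 1) xs else gsDots (s + 1) xs

theorem gsDots_enum (xs : List String) : ∀ s : Int,
    (PySem.List.enumerate xs s).filterMap (fun p => if p.2 = "." then some p.1 else none)
      = gsDots s xs := by
  induction xs with
  | nil => intro s; simp [PySem.List.enumerate_nil, gsDots]
  | cons x xs ih =>
      intro s
      by_cases hx : x = "." <;>
        simp [PySem.List.enumerate_cons, gsDots, hx, ih]

theorem gsDiffs_char (xs : List String) : ∀ (prev : Int) (i : Int), prev < i →
    gsDiffs (prev :: gsDots i xs ++ [i + xs.length])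
      = gsS (i - prev - 1) xs := by
  induction xs with
  | nil =>
      intro prev i h
      simp only [gsDots, List.length_nil, Int.natCast_zero, add_zero]
      by_cases hgt : i - prev > 1
      · have hn : i - prev - 1 ≠ 0 := by omega
        simp [gsDiffs, gsS, hgt, hn]
      · have hn : i - prev - 1 = 0 := by omega
        simp [gsDiffs, gsS, hgt, hn]
  | cons x xs ih =>
      intro prev i h
      by_cases hx : x = "."
      · have hrw : gsDots i (x :: xs) = i :: gsDots (i + 1) xs := by simp [gsDots, hx]
        have hlen : i + ((x :: xs).length : Int) = (i + 1) + (xs.length : Int) := by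
          simp; omega
        rw [hrw, hlen]
        have ihv := ih i (i + 1) (by omega)
        by_cases hgt : i - prev > 1
        · have hn : i - prev - 1 ≠ 0 := by omega
          simp only [gsDiffs, List.cons_append, List.drop_succ_cons, List.drop_zero,
            List.zip_cons_cons, List.filterMap_cons] at ihv ⊢
          simp [hgt, hn, gsS, hx]
          have h0 : (i + 1) - i - 1 = (0 : Int) := by omega
          rw [h0] at ihv
          simpa using ihv
        · have hn : i - prev - 1 = 0 := by omega
          simp only [gsDiffs, List.cons_append, List.drop_succ_cons, List.drop_zero,
            List.zip_cons_cons, List.filterMap_cons] at ihv ⊢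
          simp [hgt, hn, gsS, hx]
          have h0 : (i + 1) - i - 1 = (0 : Int) := by omega
          rw [h0] at ihv
          simpa using ihv
      · have hrw : gsDots i (x :: xs) = gsDots (i + 1) xs := by simp [gsDots, hx]
        have hlen : i + ((x :: xs).length : Int) = (i + 1) + (xs.length : Int) := by
          simp; omega
        rw [hrw, hlen]
        have ihv := ih prev (i + 1) (by omega)
        have : (i + 1) - prev - 1 = (i - prev - 1) + 1 := by omega
        rw [ihv, this]
        simp [gsS, hx]

theorem gsAlt_char (xs : List String) : get_spring_line_islands_records_alt xs = gsS 0 xs := by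
  have h : get_spring_line_islands_records_alt xs
      = gsDiffs ((-1 : Int) :: gsDots 0 xs ++ [(0 : Int) + xs.length]) := by
    simp only [get_spring_line_islands_records_alt, gsDiffs, gsDots_enum]
    norm_num
  rw [h, gsDiffs_char xs (-1) 0 (by omega)]
  norm_num

-- ===== VERDICT (by name: the statement is the Claim_ definition above) =====
theorem get_spring_line_islands_records_spec : Claim_equal_get_spring_line_islands_records := by
  intro xs _
  unfold Spec_get_spring_line_islands_records
  have hstep : (fun (st : List (List String) × List String) elem =>
      if elem = "." ∧ st.2 ≠ [] then (st.1 ++ [st.2], ([] : List String))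
      else if elem ≠ "." then (st.1, st.2 ++ [elem])
      else st) = gsStep := by
    funext st e
    simp only [gsStep]
  have hA : get_spring_line_islands_records xs = gsFin (xs.foldl gsStep ([], [])) := by
    simp only [get_spring_line_islands_records, gsFin]
    rw [hstep]
  rw [hA, gsA_char xs [] [], gsAlt_char]
  simp
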